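-- pv_equiv track=rewrite | github.com/ilovemyminutes/problem-solving | line-plus-boostcamp-2021/01.py | solution
-- ===== SOURCE A (Python) =====
-- def solution(param0):
--     candidates = []
--
--     # 오름차순, 내림차순 정렬 각각에 대해 검증
--     for reverse in [True, False]:
--         ideal = sorted(param0, reverse=reverse) # 올바른 정렬 형태
--         if ideal == param0:
--             return [0, 0] # 정렬할 필요가 없는 경우(최소 차이 0)
--
--         m, n = 0, len(param0) - 1
--
--         # m 인덱스 탐색
--         while 0 <= m < len(param0):
--             v_ideal = ideal[m]
--             v_origin = param0[m]
--             if v_ideal != v_origin: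
--                 break
--             m += 1
--
--         # n 인덱스 탐색
--         while 0 <= n < len(param0):
--             v_ideal = ideal[n]
--             v_origin = param0[n]
--             if v_ideal != v_origin:
--                 break
--             n -= 1
--
--         candidates.append((m, n))
--     answer = list(min(candidates, key=lambda x: x[1]-x[0])) # 차가 최소인 [m, n]
--     return answer
-- ===== SOURCE B (Python) =====
-- def solution(param0):
--     # Sort-free O(n): a position is "misplaced" iff an out-of-order element exists
--     # on one of its sides; one forward sweep (running extreme) finds the rightmost
--     # such index, one backward sweep the leftmost. Done for descending order first,
--     # then ascending, keeping A's early [0,0] return and first-wins tie-break.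
--     n = len(param0)
--     if n == 0:
--         return [0, 0]
--     best = None
--     for desc in (True, False):
--         out_of_order = (lambda prev, cur: prev < cur) if desc else (lambda prev, cur: prev > cur)
--         right = None
--         run = param0[0]
--         for j in range(1, n):
--             if out_of_order(run, param0[j]):
--                 right = j
--             else:
--                 run = param0[j]
--         if right is None:
--             return [0, 0]  # already sorted this way
--         left = 0
--         run = param0[n - 1]
--         for i in range(n - 2, -1, -1):
--             if out_of_order(param0[i], run):
--                 left = i
--             else:
--                 run = param0[i]
--         if best is None or right - left < best[1] - best[0]:
--             best = [left, right]
--     return best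
-- ===== Notes on version B (the rewrite author's own statement) =====
-- stated objective: faster
-- what changed: B never sorts: instead of comparing the list with sorted(param0) per direction, it finds the rightmost index preceded by a running-extreme violation in one forward sweep and the leftmost index followed by one in one backward sweep, which provably coincide with A's first/last mismatch against the sorted ideal.
import Mathlib
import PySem

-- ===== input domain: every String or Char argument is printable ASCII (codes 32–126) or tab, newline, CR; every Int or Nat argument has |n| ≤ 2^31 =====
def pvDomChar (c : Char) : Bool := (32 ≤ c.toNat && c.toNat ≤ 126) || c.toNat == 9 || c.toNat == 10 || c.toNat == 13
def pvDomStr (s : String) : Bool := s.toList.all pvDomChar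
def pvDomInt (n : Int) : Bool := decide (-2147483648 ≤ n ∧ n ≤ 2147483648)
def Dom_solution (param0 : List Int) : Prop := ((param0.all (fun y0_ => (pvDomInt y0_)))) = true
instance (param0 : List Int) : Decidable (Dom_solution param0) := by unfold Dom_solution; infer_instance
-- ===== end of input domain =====

-- ===== PORT A =====
-- B replaces A's sort-and-compare by two sweep passes per direction (no sorting); equivalence proved below.
-- Port of A's forward while-loop over m (the `0 <= m` half of the guard is trivial for a Nat index;
-- indexing uses getD: inside the guard the index is in range for param0, and for ideal whenever
-- ideal has the same length, which holds for every call A makes).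
def solLoopM (ideal param0 : List Int) (m : Nat) : Nat :=
  if m < param0.length then
    if ideal.getD m 0 ≠ param0.getD m 0 then m
    else solLoopM ideal param0 (m + 1)
  else m
termination_by param0.length - m

-- Port of A's backward while-loop over n (n is a Python int and may reach -1).
def solLoopN (ideal param0 : List Int) (n : Int) : Int :=
  if 0 ≤ n ∧ n < (param0.length : Int) then
    if ideal.getD n.toNat 0 ≠ param0.getD n.toNat 0 then n
    else solLoopN ideal param0 (n - 1)
  else n
termination_by (n + 1).toNat
decreasing_by omega

-- A's `for reverse in [True, False]` with its early returns, unrolled literally.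
def solution (param0 : List Int) : List Int :=
  let ideal1 := PySem.List.sorted param0 (fun x => x) true
  if ideal1 = param0 then [0, 0]
  else
    let c1 : Int × Int :=
      ((solLoopM ideal1 param0 0 : Int), solLoopN ideal1 param0 ((param0.length : Int) - 1))
    let ideal2 := PySem.List.sorted param0 (fun x => x) false
    if ideal2 = param0 then [0, 0]
    else
      let c2 : Int × Int :=
        ((solLoopM ideal2 param0 0 : Int), solLoopN ideal2 param0 ((param0.length : Int) - 1))
      match PySem.List.min? [c1, c2] (fun x => x.2 - x.1) with
      | some r => [r.1, r.2]
      | none => []  -- unreachable: the candidate list is nonempty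

-- ===== PORT B =====
-- `for j in range(1, n): if out_of_order(run, param0[j]): right = j else: run = param0[j]`,
-- scanning the remaining elements structurally with the python loop's (run, j, right) state.
def fwdScan (ooo : Int → Int → Bool) (run : Int) (j : Int) (right : Option Int) :
    List Int → Option Int
  | [] => right
  | x :: xs =>
    if ooo run x then fwdScan ooo run (j + 1) (some j) xs
    else fwdScan ooo x (j + 1) right xs

-- `for i in range(n-2, -1, -1): if out_of_order(param0[i], run): left = i else: run = param0[i]`,
-- scanning param0[n-2], …, param0[0] (= reverse of param0 without its last element).
def bwdScan (ooo : Int → Int → Bool) (run : Int) (i : Int) (left : Int) :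
    List Int → Int
  | [] => left
  | x :: xs =>
    if ooo x run then bwdScan ooo run (i - 1) i xs
    else bwdScan ooo x (i - 1) left xs

-- one direction's body: forward sweep for `right` (None → this order is already sorted),
-- then backward sweep for `left`
def altCand (ooo : Int → Int → Bool) (a : Int) (rest : List Int) : Option (Int × Int) :=
  match fwdScan ooo a 1 none rest with
  | none => none
  | some r =>
    let p := a :: rest
    let l := bwdScan ooo (p.getLastD 0) ((p.length : Int) - 2) 0 p.dropLast.reverse
    some (l, r)

-- `for desc in (True, False)` with the early returns and the best-update unrolled
def solution_alt (param0 : List Int) : List Int :=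
  match param0 with
  | [] => [0, 0]
  | a :: rest =>
    match altCand (fun prev cur => decide (prev < cur)) a rest with
    | none => [0, 0]
    | some cD =>
      match altCand (fun prev cur => decide (prev > cur)) a rest with
      | none => [0, 0]
      | some cA =>
        let best := if cA.2 - cA.1 < cD.2 - cD.1 then cA else cD
        [best.1, best.2]

-- ===== PRECONDITION & SPEC =====
def Spec_solution (param0 : List Int) (out : List Int) : Prop := out = solution_alt param0
instance (param0 : List Int) (out : List Int) : Decidable (Spec_solution param0 out) := by unfold Spec_solution; infer_instance

-- ===== CLAIM (what is proved, stated in full; the proofs are below) =====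
def Claim_equal_solution : Prop := ∀ (param0 : List Int), Dom_solution param0 → Spec_solution param0 (solution param0)

-- ===== LEMMAS AND PROOFS =====

-- k is a mismatch position of param0 vs the sorted ideal (what A's loops scan for)
def Mis (p s : List Int) (k : Nat) : Prop :=
  k < p.length ∧ p.getD k 0 ≠ s.getD k 0

-- k has a strictly out-of-order element before it (what B's forward sweep detects)
def VR (ooo : Int → Int → Bool) (p : List Int) (k : Nat) : Prop :=
  k < p.length ∧ ∃ i < k, ooo (p.getD i 0) (p.getD k 0) = true

-- k has a strictly out-of-order element after it (what B's backward sweep detects)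
def VL (ooo : Int → Int → Bool) (p : List Int) (k : Nat) : Prop :=
  k < p.length ∧ ∃ j, k < j ∧ j < p.length ∧ ooo (p.getD k 0) (p.getD j 0) = true

theorem exists_mismatch {p s : List Int} (hl : s.length = p.length) (hne : s ≠ p) :
    ∃ k, Mis p s k := by
  by_contra h
  push Not at h
  apply hne
  apply List.ext_getElem hl
  intro k hk1 hk2
  have hk := h k
  unfold Mis at hk
  push Not at hk
  have h2 := hk hk2
  rw [List.getD_eq_getElem p 0 hk2, List.getD_eq_getElem s 0 hk1] at h2
  exact h2.symm

-- membership in drop/take as an index statement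
theorem mem_drop_iff (p : List Int) (m : Nat) (x : Int) :
    x ∈ p.drop m ↔ ∃ j, m ≤ j ∧ j < p.length ∧ p.getD j 0 = x := by
  rw [List.mem_iff_getElem]
  constructor
  · rintro ⟨t, ht, rfl⟩
    have htl : m + t < p.length := by
      simp only [List.length_drop] at ht; omega
    refine ⟨m + t, by omega, htl, ?_⟩
    rw [List.getD_eq_getElem p 0 htl, List.getElem_drop]
  · rintro ⟨j, hmj, hjl, rfl⟩
    have htl : j - m < (p.drop m).length := by
      simp only [List.length_drop]; omega
    refine ⟨j - m, htl, ?_⟩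
    rw [List.getD_eq_getElem p 0 hjl, List.getElem_drop]
    congr 1; omega

theorem mem_take_iff (p : List Int) (m : Nat) (x : Int) :
    x ∈ p.take m ↔ ∃ i, i < m ∧ i < p.length ∧ p.getD i 0 = x := by
  rw [List.mem_iff_getElem]
  constructor
  · rintro ⟨t, ht, rfl⟩
    have htl : t < p.length ∧ t < m := by
      simp only [List.length_take] at ht; omega
    refine ⟨t, htl.2, htl.1, ?_⟩
    rw [List.getD_eq_getElem p 0 htl.1, List.getElem_take]
  · rintro ⟨i, him, hil, rfl⟩
    have htl : i < (p.take m).length := by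
      simp only [List.length_take]; omega
    refine ⟨i, htl, ?_⟩
    rw [List.getD_eq_getElem p 0 hil, List.getElem_take]

-- A's forward loop returns the least mismatch index
theorem solLoopM_eq {p s : List Int} {k m : Nat}
    (hk : Mis p s k) (hm : m ≤ k) (hmin : ∀ j, m ≤ j → j < k → ¬ Mis p s j) :
    solLoopM s p m = k := by
  suffices h : ∀ d m', k - m' = d → m' ≤ k →
      (∀ j, m' ≤ j → j < k → ¬ Mis p s j) → solLoopM s p m' = k from
    h (k - m) m rfl hm hmin
  intro d
  induction d with
  | zero =>
    intro m' hd hm' _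
    have hmk : m' = k := by omega
    subst hmk
    rw [solLoopM, if_pos hk.1, if_pos (Ne.symm hk.2)]
  | succ d ih =>
    intro m' hd hm' hmin'
    have hmk : m' < k := by omega
    have hnm : ¬ Mis p s m' := hmin' m' le_rfl hmk
    rw [solLoopM, if_pos (by have := hk.1; omega : m' < p.length)]
    rw [if_neg (by intro hx; exact hnm ⟨by have := hk.1; omega, Ne.symm hx⟩)]
    exact ih (m' + 1) (by omega) (by omega) (fun j hj1 hj2 => hmin' j (by omega) hj2)

-- A's backward loop returns the greatest mismatch index
theorem solLoopN_eq {p s : List Int} {k : Nat} {n : Int}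
    (hk : Mis p s k) (hn : (k : Int) ≤ n) (hlen : n < (p.length : Int))
    (hmax : ∀ j : Nat, k < j → (j : Int) ≤ n → ¬ Mis p s j) :
    solLoopN s p n = k := by
  suffices h : ∀ (d : Nat) (n' : Int), n' = (k : Int) + (d : Int) → n' < (p.length : Int) →
      (∀ j : Nat, k < j → (j : Int) ≤ n' → ¬ Mis p s j) → solLoopN s p n' = k from
    h (n - k).toNat n (by omega) hlen hmax
  intro d
  induction d with
  | zero =>
    intro n' hd hlen' _
    have hnk : n' = (k : Int) := by omega
    subst hnk
    rw [solLoopN, if_pos ⟨by omega, hlen'⟩]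
    have ht : (k : Int).toNat = k := by omega
    rw [ht, if_pos (Ne.symm hk.2)]
  | succ d ih =>
    intro n' hd hlen' hmax'
    have hkn : (k : Int) < n' := by omega
    have hnm : ¬ Mis p s n'.toNat := hmax' n'.toNat (by omega) (by omega)
    rw [solLoopN, if_pos ⟨by omega, hlen'⟩]
    rw [if_neg (by intro hx; exact hnm ⟨by omega, Ne.symm hx⟩)]
    exact ih (n' - 1) (by omega) (by omega)
      (fun j hj1 hj2 => hmax' j hj1 (by omega))

theorem min?_pair (a b : Int × Int) (f : Int × Int → Int) :
    PySem.List.min? [a, b] f = some (if f b < f a then b else a) := by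
  simp only [PySem.List.min?, List.foldl]
  split_ifs <;> rfl

-- B's forward sweep: invariant over the remaining suffix
theorem fwdScan_go (ooo : Int → Int → Bool)
    (Htot : ∀ a b, ooo a b = false ∨ ooo b a = false)
    (HT : ∀ a b c, ooo a b = false → ooo b c = false → ooo a c = false)
    (p : List Int) :
    ∀ (xs : List Int) (jn : Nat) (run : Int) (right : Option Int),
    xs = p.drop jn → 1 ≤ jn →
    (∃ i, i < jn ∧ p.getD i 0 = run) →
    (∀ i, i < jn → ooo (p.getD i 0) run = false) →
    ((right = none ∧ ∀ k, k < jn → ¬ VR ooo p k) ∨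
      (∃ rn : Nat, right = some (rn : Int) ∧ rn < jn ∧ VR ooo p rn ∧
        ∀ k, rn < k → k < jn → ¬ VR ooo p k)) →
    ((fwdScan ooo run (jn : Int) right xs = none ∧ ∀ k, ¬ VR ooo p k) ∨
      (∃ rn : Nat, fwdScan ooo run (jn : Int) right xs = some (rn : Int) ∧ VR ooo p rn ∧
        ∀ k, rn < k → ¬ VR ooo p k)) := by
  intro xs
  induction xs with
  | nil =>
    intro jn run right hxs _ _ _ hr
    have hlen : p.length ≤ jn := by
      by_contra hc
      rw [List.drop_eq_getElem_cons (show jn < p.length by omega)] at hxs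
      simp at hxs
      omega
    rcases hr with ⟨h0, hall⟩ | ⟨rn, h0, _, hvr, hall⟩
    · left
      refine ⟨by simpa [fwdScan] using h0, fun k hv => ?_⟩
      by_cases hkj : k < jn
      · exact hall k hkj hv
      · exact absurd hv.1 (by omega)
    · right
      refine ⟨rn, by simpa [fwdScan] using h0, hvr, fun k hk1 hv => ?_⟩
      by_cases hkj : k < jn
      · exact hall k hk1 hkj hv
      · exact absurd hv.1 (by omega)
  | cons x xs ih =>
    intro jn run right hxs hj hmem hext hr
    have hjl : jn < p.length := by
      by_contra hc
      rw [List.drop_eq_nil_of_le (by omega)] at hxs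
      exact absurd hxs (by simp)
    have hdc := List.drop_eq_getElem_cons hjl
    rw [← hxs] at hdc
    have hx : x = p.getD jn 0 := by
      rw [List.getD_eq_getElem p 0 hjl]; exact (List.cons.injEq .. ▸ hdc).1
    have hxs' : xs = p.drop (jn + 1) := (List.cons.injEq .. ▸ hdc).2
    have hcast : (jn : Int) + 1 = ((jn + 1 : Nat) : Int) := by push_cast; ring
    rw [fwdScan]
    by_cases hb : ooo run x = true
    · rw [if_pos hb, hcast]
      obtain ⟨i0, hi0, hrun⟩ := hmem
      refine ih (jn + 1) run (some (jn : Int)) hxs' (by omega) ⟨i0, by omega, hrun⟩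
        (fun i hi => ?_) (Or.inr ⟨jn, rfl, by omega, ?_, fun k hk1 hk2 => by omega⟩)
      · by_cases hij : i < jn
        · exact hext i hij
        · have : i = jn := by omega
          subst this
          rw [← hx]
          rcases Htot x run with h | h
          · exact h
          · rw [h] at hb; exact absurd hb (by simp)
      · exact ⟨hjl, i0, hi0, by rw [hrun, ← hx]; exact hb⟩
    · rw [if_neg hb, hcast]
      have hbf : ooo run x = false := by simpa using hb
      have hnvr : ¬ VR ooo p jn := by
        rintro ⟨_, i, hij, htrue⟩
        have := HT (p.getD i 0) run x (hext i hij) hbf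
        rw [← hx] at htrue
        rw [htrue] at this
        exact absurd this (by simp)
      refine ih (jn + 1) x right hxs' (by omega) ⟨jn, by omega, hx.symm⟩
        (fun i hi => ?_) ?_
      · by_cases hij : i < jn
        · exact HT (p.getD i 0) run x (hext i hij) hbf
        · have : i = jn := by omega
          subst this
          rw [← hx]
          rcases Htot x x with h | h <;> exact h
      · rcases hr with ⟨h0, hall⟩ | ⟨rn, h0, hlt, hvr, hall⟩
        · left
          refine ⟨h0, fun k hk => ?_⟩
          by_cases hkj : k < jn
          · exact hall k hkj
          · have : k = jn := by omega
            subst this; exact hnvr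
        · right
          refine ⟨rn, h0, by omega, hvr, fun k hk1 hk2 => ?_⟩
          by_cases hkj : k < jn
          · exact hall k hk1 hkj
          · have : k = jn := by omega
            subst this; exact hnvr

-- B's forward sweep, from its actual initial state
theorem fwdScan_spec (ooo : Int → Int → Bool)
    (Htot : ∀ a b, ooo a b = false ∨ ooo b a = false)
    (HT : ∀ a b c, ooo a b = false → ooo b c = false → ooo a c = false)
    (a : Int) (rest : List Int) :
    ((fwdScan ooo a 1 none rest = none ∧ ∀ k, ¬ VR ooo (a :: rest) k) ∨
      (∃ rn : Nat, fwdScan ooo a 1 none rest = some (rn : Int) ∧ VR ooo (a :: rest) rn ∧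
        ∀ k, rn < k → ¬ VR ooo (a :: rest) k)) := by
  have h := fwdScan_go ooo Htot HT (a :: rest) rest 1 a none (by simp) le_rfl
    ⟨0, by omega, by simp⟩
    (fun i hi => by
      have : i = 0 := by omega
      subst this
      simp only [List.getD]
      rcases Htot a a with h | h <;> simpa using h)
    (Or.inl ⟨rfl, fun k hk hv => by
      obtain ⟨_, i, hik, _⟩ := hv; omega⟩)
  simpa using h


-- B's backward sweep: invariant over the remaining (reversed) prefix
theorem bwdScan_go (ooo : Int → Int → Bool)
    (Htot : ∀ a b, ooo a b = false ∨ ooo b a = false)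
    (HT : ∀ a b c, ooo a b = false → ooo b c = false → ooo a c = false)
    (p : List Int) :
    ∀ (xs : List Int) (tn : Nat) (run left : Int),
    xs = (p.take tn).reverse → tn ≤ p.length →
    (∃ j, tn ≤ j ∧ j < p.length ∧ p.getD j 0 = run) →
    (∀ j, tn ≤ j → j < p.length → ooo run (p.getD j 0) = false) →
    ((left = 0 ∧ ∀ k, tn ≤ k → ¬ VL ooo p k) ∨
      (∃ ln : Nat, left = (ln : Int) ∧ tn ≤ ln ∧ VL ooo p ln ∧
        ∀ k, tn ≤ k → k < ln → ¬ VL ooo p k)) →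
    ((bwdScan ooo run ((tn : Int) - 1) left xs = 0 ∧ ∀ k, ¬ VL ooo p k) ∨
      (∃ ln : Nat, bwdScan ooo run ((tn : Int) - 1) left xs = (ln : Int) ∧ VL ooo p ln ∧
        ∀ k, k < ln → ¬ VL ooo p k)) := by
  intro xs
  induction xs with
  | nil =>
    intro tn run left hxs htn _ _ hl
    have htn0 : tn = 0 ∨ p = [] := by
      rcases List.take_eq_nil_iff.mp (by
        have := congrArg List.reverse hxs
        simpa using this.symm) with h | h
      · exact Or.inl h
      · exact Or.inr h
    rcases hl with ⟨h0, hall⟩ | ⟨ln, h0, hle, hvl, hall⟩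
    · left
      refine ⟨by simpa [bwdScan] using h0, fun k hv => ?_⟩
      rcases htn0 with h | h
      · exact hall k (by omega) hv
      · exact absurd hv.1 (by simp [h])
    · right
      refine ⟨ln, by simpa [bwdScan] using h0, hvl, fun k hk hv => ?_⟩
      rcases htn0 with h | h
      · exact hall k (by omega) hk hv
      · exact absurd hv.1 (by simp [h])
  | cons x xs ih =>
    intro tn run left hxs htn hmem hext hl
    have htn1 : 1 ≤ tn := by
      by_contra hc
      have : tn = 0 := by omega
      rw [this] at hxs
      exact absurd hxs (by simp)
    have hidx : tn - 1 < p.length := by omega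
    have hsplit : p.take tn = p.take (tn - 1) ++ [p.getD (tn - 1) 0] := by
      have h1 : p.take (tn - 1 + 1) = p.take (tn - 1) ++ p[tn - 1]?.toList :=
        List.take_add_one
      rw [List.getElem?_eq_getElem hidx] at h1
      have h2 : tn - 1 + 1 = tn := by omega
      rw [h2] at h1
      rw [h1, List.getD_eq_getElem p 0 hidx]
      simp
    have hxx : x = p.getD (tn - 1) 0 ∧ xs = (p.take (tn - 1)).reverse := by
      rw [hsplit] at hxs
      simp only [List.reverse_append, List.reverse_cons, List.reverse_nil,
        List.nil_append, List.cons_append] at hxs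
      exact ⟨(List.cons.injEq .. ▸ hxs).1, by
        have := (List.cons.injEq .. ▸ hxs).2; simpa using this⟩
    obtain ⟨hx, hxs'⟩ := hxx
    have hcast : (tn : Int) - 1 - 1 = ((tn - 1 : Nat) : Int) - 1 := by omega
    rw [bwdScan]
    by_cases hb : ooo x run = true
    · rw [if_pos hb, hcast]
      obtain ⟨j0, hj0, hj0l, hrun⟩ := hmem
      have hvl : VL ooo p (tn - 1) :=
        ⟨by omega, j0, by omega, hj0l, by rw [hrun, ← hx]; exact hb⟩
      have hrw : (tn : Int) - 1 = ((tn - 1 : Nat) : Int) := by omega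
      rw [hrw]
      refine ih (tn - 1) run ((tn - 1 : Nat) : Int) hxs' (by omega)
        ⟨j0, by omega, hj0l, hrun⟩ (fun j hj1 hj2 => ?_)
        (Or.inr ⟨tn - 1, rfl, le_rfl, hvl, fun k hk1 hk2 => by omega⟩)
      by_cases hjt : tn ≤ j
      · exact hext j hjt hj2
      · have : j = tn - 1 := by omega
        subst this
        rw [← hx]
        rcases Htot run x with h | h
        · exact h
        · rw [h] at hb; exact absurd hb (by simp)
    · rw [if_neg hb, hcast]
      have hbf : ooo x run = false := by simpa using hb
      have hnvl : ¬ VL ooo p (tn - 1) := by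
        rintro ⟨_, j, hj1, hj2, htrue⟩
        have := HT x run (p.getD j 0) hbf (hext j (by omega) hj2)
        rw [← hx] at htrue
        rw [htrue] at this
        exact absurd this (by simp)
      refine ih (tn - 1) x left hxs' (by omega) ⟨tn - 1, le_rfl, hidx, hx.symm⟩
        (fun j hj1 hj2 => ?_) ?_
      · by_cases hjt : tn ≤ j
        · exact HT x run (p.getD j 0) hbf (hext j hjt hj2)
        · have : j = tn - 1 := by omega
          subst this
          rw [← hx]
          rcases Htot x x with h | h <;> exact h
      · rcases hl with ⟨h0, hall⟩ | ⟨ln, h0, hle, hvl, hall⟩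
        · left
          refine ⟨h0, fun k hk => ?_⟩
          by_cases hkt : tn ≤ k
          · exact hall k hkt
          · have : k = tn - 1 := by omega
            subst this; exact hnvl
        · right
          refine ⟨ln, h0, by omega, hvl, fun k hk1 hk2 => ?_⟩
          by_cases hkt : tn ≤ k
          · exact hall k hkt hk2
          · have : k = tn - 1 := by omega
            subst this; exact hnvl

-- B's backward sweep, from its actual initial state, when a least left-violation exists
theorem bwdScan_spec (ooo : Int → Int → Bool)
    (Htot : ∀ a b, ooo a b = false ∨ ooo b a = false)
    (HT : ∀ a b c, ooo a b = false → ooo b c = false → ooo a c = false)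
    (p : List Int) (hp : p ≠ []) (m : Nat)
    (hm : VL ooo p m) (hmin : ∀ k, k < m → ¬ VL ooo p k) :
    bwdScan ooo (p.getLastD 0) ((p.length : Int) - 2) 0 p.dropLast.reverse = (m : Int) := by
  have hlen1 : 1 ≤ p.length := by
    cases p with
    | nil => exact absurd rfl hp
    | cons a t => simp
  have hlast : p.getLastD 0 = p.getD (p.length - 1) 0 := by
    rw [List.getLastD_eq_getLast?, List.getLast?_eq_getElem?,
      List.getD_eq_getElem p 0 (by omega), List.getElem?_eq_getElem (by omega)]
    rfl
  have hdl : p.dropLast.reverse = (p.take (p.length - 1)).reverse := by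
    rw [List.dropLast_eq_take]
  have hcast : (p.length : Int) - 2 = ((p.length - 1 : Nat) : Int) - 1 := by omega
  rw [hdl, hcast, hlast]
  have h := bwdScan_go ooo Htot HT p ((p.take (p.length - 1)).reverse) (p.length - 1)
    (p.getD (p.length - 1) 0) 0 rfl (by omega)
    ⟨p.length - 1, le_rfl, by omega, rfl⟩
    (fun j hj1 hj2 => by
      have : j = p.length - 1 := by omega
      subst this
      rcases Htot (p.getD (p.length - 1) 0) (p.getD (p.length - 1) 0) with h | h <;> exact h)
    (Or.inl ⟨rfl, fun k hk hv => by
      obtain ⟨hkl, j, hj1, hj2, _⟩ := hv; omega⟩)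
  rcases h with ⟨_, hall⟩ | ⟨ln, heq, hvl, hall⟩
  · exact absurd hm (hall m)
  · have : ln = m := by
      by_contra hc
      rcases Nat.lt_or_ge ln m with h | h
      · exact hmin ln h hvl
      · exact hall m (by omega) hm
    rw [heq, this]

-- the least mismatch index against the sorted ideal is the least left-violation index
theorem least_Mis_VL (ooo : Int → Int → Bool)
    (Hanti : ∀ a b, ooo a b = false → ooo b a = false → a = b)
    (p s : List Int) (hperm : s.Perm p)
    (hsort : ∀ i j, i < j → j < s.length → ooo (s.getD i 0) (s.getD j 0) = false)
    (m : Nat) (hm : Mis p s m) (hmin : ∀ i, i < m → ¬ Mis p s i) :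
    VL ooo p m ∧ ∀ i, i < m → ¬ VL ooo p i := by
  have hl : s.length = p.length := hperm.length_eq
  have hmn : m < p.length := hm.1
  have hagree : ∀ i, i < m → p.getD i 0 = s.getD i 0 := by
    intro i hi
    have := hmin i hi
    unfold Mis at this
    push Not at this
    exact this (by omega)
  have htake : s.take m = p.take m := by
    apply List.ext_getElem (by simp [hl])
    intro i h1 h2
    have hi : i < m := by
      simp only [List.length_take] at h1; omega
    rw [List.getElem_take, List.getElem_take]
    have h3 := hagree i hi
    rw [List.getD_eq_getElem p 0 (by omega), List.getD_eq_getElem s 0 (by omega)] at h3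
    exact h3.symm
  have hdrop : (s.drop m).Perm (p.drop m) := by
    have h := hperm
    rw [← List.take_append_drop m s, ← List.take_append_drop m p, htake] at h
    exact (List.perm_append_left_iff _).mp h
  -- s[m] occurs in p at some index j > m
  obtain ⟨j, hmj, hjl, hgj⟩ := (mem_drop_iff p m _).mp
    (hdrop.mem_iff.mp ((mem_drop_iff s m _).mpr ⟨m, le_rfl, by omega, rfl⟩))
  have hjm : m < j := by
    rcases Nat.lt_or_ge m j with h | h
    · exact h
    · have : j = m := by omega
      subst this
      exact absurd hgj hm.2
  -- p[m] occurs in s at some index j' > m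
  obtain ⟨j', hmj', hjl', hgj'⟩ := (mem_drop_iff s m _).mp
    ((hdrop.symm.mem_iff).mp ((mem_drop_iff p m _).mpr ⟨m, le_rfl, hmn, rfl⟩))
  constructor
  · refine ⟨hmn, j, hjm, hjl, ?_⟩
    rw [hgj]
    by_cases hc : ooo (p.getD m 0) (s.getD m 0) = true
    · exact hc
    · exfalso
      have hjm' : m < j' := by
        rcases Nat.lt_or_ge m j' with h | h
        · exact h
        · have : j' = m := by omega
          subst this
          exact absurd hgj'.symm hm.2
      have hfalse := hsort m j' hjm' hjl'
      rw [hgj'] at hfalse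
      exact hm.2 (Hanti (p.getD m 0) (s.getD m 0) (by simpa using hc) hfalse)
  · rintro i hi ⟨_, j2, hij2, hj2l, htrue⟩
    have hgi := hagree i hi
    by_cases hj2m : j2 < m
    · rw [hgi, hagree j2 hj2m] at htrue
      rw [hsort i j2 hij2 (by omega)] at htrue
      exact absurd htrue (by simp)
    · obtain ⟨j3, hmj3, hj3l, hgj3⟩ := (mem_drop_iff s m _).mp
        (hdrop.symm.mem_iff.mp ((mem_drop_iff p m _).mpr ⟨j2, by omega, hj2l, rfl⟩))
      rw [hgi, ← hgj3] at htrue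
      rw [hsort i j3 (by omega) (by omega)] at htrue
      exact absurd htrue (by simp)

-- the greatest mismatch index against the sorted ideal is the greatest right-violation index
theorem greatest_Mis_VR (ooo : Int → Int → Bool)
    (Hanti : ∀ a b, ooo a b = false → ooo b a = false → a = b)
    (p s : List Int) (hperm : s.Perm p)
    (hsort : ∀ i j, i < j → j < s.length → ooo (s.getD i 0) (s.getD j 0) = false)
    (n : Nat) (hn : Mis p s n) (hmax : ∀ k, n < k → ¬ Mis p s k) :
    VR ooo p n ∧ ∀ k, n < k → ¬ VR ooo p k := by
  have hl : s.length = p.length := hperm.length_eq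
  have hnn : n < p.length := hn.1
  have hagree : ∀ k, n < k → k < p.length → p.getD k 0 = s.getD k 0 := by
    intro k hk hkl
    have := hmax k hk
    unfold Mis at this
    push Not at this
    exact this hkl
  have hdrop : s.drop (n + 1) = p.drop (n + 1) := by
    apply List.ext_getElem (by simp [hl])
    intro t h1 h2
    have ht : n + 1 + t < p.length := by
      simp only [List.length_drop] at h1 ⊢; omega
    rw [List.getElem_drop, List.getElem_drop]
    have h3 := hagree (n + 1 + t) (by omega) ht
    rw [List.getD_eq_getElem p 0 ht, List.getD_eq_getElem s 0 (by omega)] at h3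
    exact h3.symm
  have htake : (s.take (n + 1)).Perm (p.take (n + 1)) := by
    have h := hperm
    rw [← List.take_append_drop (n + 1) s, ← List.take_append_drop (n + 1) p, hdrop] at h
    exact (List.perm_append_right_iff _).mp h
  -- s[n] occurs in p at some index i < n
  obtain ⟨i, hin, hil, hgi⟩ := (mem_take_iff p (n + 1) _).mp
    (htake.mem_iff.mp ((mem_take_iff s (n + 1) _).mpr ⟨n, by omega, by omega, rfl⟩))
  have hin' : i < n := by
    rcases Nat.lt_or_ge i n with h | h
    · exact h
    · have : i = n := by omega
      subst this
      exact absurd hgi hn.2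
  -- p[n] occurs in s at some index i' < n
  obtain ⟨i', hin2, hil2, hgi2⟩ := (mem_take_iff s (n + 1) _).mp
    (htake.symm.mem_iff.mp ((mem_take_iff p (n + 1) _).mpr ⟨n, by omega, hnn, rfl⟩))
  constructor
  · refine ⟨hnn, i, hin', ?_⟩
    rw [hgi]
    by_cases hc : ooo (s.getD n 0) (p.getD n 0) = true
    · exact hc
    · exfalso
      have hin2' : i' < n := by
        rcases Nat.lt_or_ge i' n with h | h
        · exact h
        · have : i' = n := by omega
          subst this
          exact absurd hgi2.symm hn.2
      have hfalse := hsort i' n hin2' (by omega)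
      rw [hgi2] at hfalse
      exact hn.2 ((Hanti (s.getD n 0) (p.getD n 0) (by simpa using hc) hfalse).symm)
  · rintro k hk ⟨hkl, i2, hi2k, htrue⟩
    have hgk := hagree k hk hkl
    by_cases hi2n : n < i2
    · rw [hgk, hagree i2 hi2n (by omega)] at htrue
      rw [hsort i2 k hi2k (by omega)] at htrue
      exact absurd htrue (by simp)
    · obtain ⟨i3, hi3n, hi3l, hgi3⟩ := (mem_take_iff s (n + 1) _).mp
        (htake.symm.mem_iff.mp ((mem_take_iff p (n + 1) _).mpr ⟨i2, by omega, by omega, rfl⟩))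
      rw [hgk, ← hgi3] at htrue
      rw [hsort i3 k (by omega) (by omega)] at htrue
      exact absurd htrue (by simp)

-- the two concrete comparison functions are strict total orders
theorem HtotLt : ∀ a b : Int, (decide (a < b)) = false ∨ (decide (b < a)) = false := by
  intro a b; simp only [decide_eq_false_iff_not, not_lt]; omega

theorem HTLt : ∀ a b c : Int, (decide (a < b)) = false → (decide (b < c)) = false →
    (decide (a < c)) = false := by
  intro a b c; simp only [decide_eq_false_iff_not, not_lt]; omega

theorem HantiLt : ∀ a b : Int, (decide (a < b)) = false → (decide (b < a)) = false → a = b := by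
  intro a b; simp only [decide_eq_false_iff_not, not_lt]; omega

theorem HtotGt : ∀ a b : Int, (decide (a > b)) = false ∨ (decide (b > a)) = false := by
  intro a b; simp only [gt_iff_lt, decide_eq_false_iff_not, not_lt]; omega

theorem HTGt : ∀ a b c : Int, (decide (a > b)) = false → (decide (b > c)) = false →
    (decide (a > c)) = false := by
  intro a b c; simp only [gt_iff_lt, decide_eq_false_iff_not, not_lt]; omega

theorem HantiGt : ∀ a b : Int, (decide (a > b)) = false → (decide (b > a)) = false → a = b := by
  intro a b; simp only [gt_iff_lt, decide_eq_false_iff_not, not_lt]; omega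

-- the sorted ideals, read through getD, never place an out-of-order pair
theorem hsort_desc (p : List Int) :
    ∀ i j, i < j → j < (PySem.List.sorted p (fun x => x) true).length →
      decide ((PySem.List.sorted p (fun x => x) true).getD i 0 <
        (PySem.List.sorted p (fun x => x) true).getD j 0) = false := by
  intro i j hij hj
  have hp := PySem.List.sorted_pairwise_rev (xs := p) (key := fun x => x)
  rw [List.pairwise_iff_getElem] at hp
  have h := hp i j (by omega) hj hij
  rw [List.getD_eq_getElem _ 0 (by omega : i < _), List.getD_eq_getElem _ 0 hj]
  simpa only [decide_eq_false_iff_not, not_lt] using h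

theorem hsort_asc (p : List Int) :
    ∀ i j, i < j → j < (PySem.List.sorted p (fun x => x) false).length →
      decide ((PySem.List.sorted p (fun x => x) false).getD i 0 >
        (PySem.List.sorted p (fun x => x) false).getD j 0) = false := by
  intro i j hij hj
  have hp := PySem.List.sorted_pairwise (xs := p) (key := fun x => x)
  rw [List.pairwise_iff_getElem] at hp
  have h := hp i j (by omega) hj hij
  rw [List.getD_eq_getElem _ 0 (by omega : i < _), List.getD_eq_getElem _ 0 hj]
  simpa only [gt_iff_lt, decide_eq_false_iff_not, not_lt] using h

-- no right-violation anywhere ↔ the list is pairwise in order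
theorem noVR_pairwise (ooo : Int → Int → Bool) (p : List Int)
    (h : ∀ k, ¬ VR ooo p k) : p.Pairwise (fun a b => ooo a b = false) := by
  rw [List.pairwise_iff_getElem]
  intro i j hi hj hij
  by_contra hc
  exact h j ⟨hj, i, hij, by
    rw [List.getD_eq_getElem p 0 hi, List.getD_eq_getElem p 0 hj]
    simpa using hc⟩

theorem pairwise_noVR (ooo : Int → Int → Bool) (p : List Int)
    (h : p.Pairwise (fun a b => ooo a b = false)) : ∀ k, ¬ VR ooo p k := by
  rw [List.pairwise_iff_getElem] at h
  rintro k ⟨hk, i, hik, htrue⟩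
  have := h i k (by omega) hk hik
  rw [List.getD_eq_getElem p 0 (by omega : i < p.length), List.getD_eq_getElem p 0 hk] at htrue
  rw [this] at htrue
  exact absurd htrue (by simp)

-- A's branch test `sorted(param0, reverse=True) == param0` ↔ B's forward sweep found nothing
theorem branch_desc (a : Int) (rest : List Int) :
    (PySem.List.sorted (a :: rest) (fun x => x) true = a :: rest) ↔
      fwdScan (fun prev cur => decide (prev < cur)) a 1 none rest = none := by
  constructor
  · intro h
    have hpw : (a :: rest).Pairwise (fun x y => decide (x < y) = false) := by
      have := PySem.List.sorted_pairwise_rev (xs := a :: rest) (key := fun x => x)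
      rw [h] at this
      exact this.imp (fun hab => by simpa only [decide_eq_false_iff_not, not_lt] using hab)
    have hno := pairwise_noVR _ _ hpw
    rcases fwdScan_spec _ HtotLt HTLt a rest with ⟨heq, _⟩ | ⟨rn, _, hvr, _⟩
    · exact heq
    · exact absurd hvr (hno rn)
  · intro h
    rcases fwdScan_spec _ HtotLt HTLt a rest with ⟨_, hno⟩ | ⟨rn, heq, _, _⟩
    · have hpw := noVR_pairwise _ _ hno
      exact PySem.List.sorted_rev_eq_self_of_pairwise (xs := a :: rest) (key := fun x => x)
        (hpw.imp (fun hab => by simpa only [decide_eq_false_iff_not, not_lt] using hab))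
    · rw [heq] at h
      exact absurd h (by simp)

theorem branch_asc (a : Int) (rest : List Int) :
    (PySem.List.sorted (a :: rest) (fun x => x) false = a :: rest) ↔
      fwdScan (fun prev cur => decide (prev > cur)) a 1 none rest = none := by
  constructor
  · intro h
    have hpw : (a :: rest).Pairwise (fun x y => decide (x > y) = false) := by
      have := PySem.List.sorted_pairwise (xs := a :: rest) (key := fun x => x)
      rw [h] at this
      exact this.imp (fun hab => by
        simpa only [gt_iff_lt, decide_eq_false_iff_not, not_lt] using hab)
    have hno := pairwise_noVR _ _ hpw
    rcases fwdScan_spec _ HtotGt HTGt a rest with ⟨heq, _⟩ | ⟨rn, _, hvr, _⟩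
    · exact heq
    · exact absurd hvr (hno rn)
  · intro h
    rcases fwdScan_spec _ HtotGt HTGt a rest with ⟨_, hno⟩ | ⟨rn, heq, _, _⟩
    · have hpw := noVR_pairwise _ _ hno
      exact PySem.List.sorted_eq_self_of_pairwise (xs := a :: rest) (key := fun x => x)
        (hpw.imp (fun hab => by
          simpa only [gt_iff_lt, decide_eq_false_iff_not, not_lt] using hab))
    · rw [heq] at h
      exact absurd h (by simp)

-- one direction: B's candidate is exactly A's (m, n) pair
theorem direction_core (ooo : Int → Int → Bool)
    (Htot : ∀ a b, ooo a b = false ∨ ooo b a = false)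
    (HT : ∀ a b c, ooo a b = false → ooo b c = false → ooo a c = false)
    (Hanti : ∀ a b, ooo a b = false → ooo b a = false → a = b)
    (a : Int) (rest s : List Int)
    (hperm : s.Perm (a :: rest))
    (hsort : ∀ i j, i < j → j < s.length → ooo (s.getD i 0) (s.getD j 0) = false)
    (hne : s ≠ a :: rest) :
    altCand ooo a rest =
      some ((solLoopM s (a :: rest) 0 : Int),
        solLoopN s (a :: rest) (((a :: rest).length : Int) - 1)) := by
  have hl : s.length = (a :: rest).length := hperm.length_eq
  obtain ⟨k0, hk0⟩ := exists_mismatch hl hne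
  letI : DecidablePred (Mis (a :: rest) s) := fun k => by unfold Mis; infer_instance
  have hex : ∃ k, Mis (a :: rest) s k := ⟨k0, hk0⟩
  set m := Nat.find hex with hmdef
  have hm : Mis (a :: rest) s m := Nat.find_spec hex
  have hmin : ∀ i, i < m → ¬ Mis (a :: rest) s i := fun i hi => Nat.find_min hex hi
  set n := Nat.findGreatest (Mis (a :: rest) s) (a :: rest).length with hndef
  have hn : Mis (a :: rest) s n := Nat.findGreatest_spec (le_of_lt hk0.1) hk0
  have hmax : ∀ k, n < k → ¬ Mis (a :: rest) s k := fun k hk hmis =>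
    Nat.findGreatest_is_greatest hk (le_of_lt hmis.1) hmis
  have hVL := least_Mis_VL ooo Hanti (a :: rest) s hperm hsort m hm hmin
  have hVR := greatest_Mis_VR ooo Hanti (a :: rest) s hperm hsort n hn hmax
  have hA1 : solLoopM s (a :: rest) 0 = m :=
    solLoopM_eq hm (Nat.zero_le _) (fun j _ hj => hmin j hj)
  have hA2 : solLoopN s (a :: rest) (((a :: rest).length : Int) - 1) = (n : Int) :=
    solLoopN_eq hn (by have := hn.1; omega) (by have := hn.1; omega)
      (fun j hj1 hj2 => hmax j hj1)
  rcases fwdScan_spec ooo Htot HT a rest with ⟨_, hno⟩ | ⟨rn, heq, hvr, hmax2⟩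
  · exact absurd hVR.1 (hno n)
  · have hrn : rn = n := by
      by_contra hc
      rcases Nat.lt_or_ge rn n with h | h
      · exact hmax2 n h hVR.1
      · exact hVR.2 rn (by omega) hvr
    have hB := bwdScan_spec ooo Htot HT (a :: rest) (by simp) m hVL.1
      (fun k hk => hVL.2 k hk)
    unfold altCand
    rw [heq]
    simp only
    rw [hB, hA1, hA2, hrn]

-- ===== VERDICT (by name: the statement is the Claim_ definition above) =====
theorem solution_spec : Claim_equal_solution := by
  intro p _
  unfold Spec_solution
  cases p with
  | nil => rfl
  | cons a rest =>
    by_cases h1 : PySem.List.sorted (a :: rest) (fun x => x) true = a :: rest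
    · have hf1 := (branch_desc a rest).mp h1
      have hA : solution (a :: rest) = [0, 0] := by
        simp only [solution]
        rw [if_pos h1]
      have hB : solution_alt (a :: rest) = [0, 0] := by
        simp only [solution_alt]
        unfold altCand
        rw [hf1]
      rw [hA, hB]
    · have hcD := direction_core _ HtotLt HTLt HantiLt a rest _
        (PySem.List.sorted_perm (xs := a :: rest) (key := fun x => x) (rev := true))
        (hsort_desc (a :: rest)) h1
      by_cases h2 : PySem.List.sorted (a :: rest) (fun x => x) false = a :: rest
      · have hf2 := (branch_asc a rest).mp h2
        have hA : solution (a :: rest) = [0, 0] := by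
          simp only [solution]
          rw [if_neg h1, if_pos h2]
        have hB : solution_alt (a :: rest) = [0, 0] := by
          simp only [solution_alt]
          rw [hcD]
          have hasc : altCand (fun prev cur => decide (prev > cur)) a rest = none := by
            unfold altCand
            rw [hf2]
          rw [hasc]
        rw [hA, hB]
      · have hcA := direction_core _ HtotGt HTGt HantiGt a rest _
          (PySem.List.sorted_perm (xs := a :: rest) (key := fun x => x) (rev := false))
          (hsort_asc (a :: rest)) h2
        simp only [solution, solution_alt]
        rw [if_neg h1, if_neg h2, hcD, hcA, min?_pair]
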